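-- pv_equiv track=rewrite | github.com/strataregula/strataregula | strataregula/cli/compile_command.py | _pattern_matches
-- ===== SOURCE A (Python) =====
-- def _pattern_matches(pattern: str, expanded_key: str) -> bool:
--     """Check if a pattern could have generated an expanded key."""
--     pattern_parts = pattern.split(".")
--     key_parts = expanded_key.split(".")
--
--     if len(pattern_parts) != len(key_parts):
--         return False
--
--     for pattern_part, key_part in zip(pattern_parts, key_parts, strict=False):
--         if pattern_part not in ("*", key_part):
--             return False
--
--     return True
-- ===== SOURCE B (Python) =====
-- def _pattern_matches(pattern: str, expanded_key: str) -> bool: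
--     """Single left-to-right scan of both strings in lockstep with two cursors;
--     no splitting, no intermediate part lists."""
--     p, k = pattern, expanded_key
--     n, m = len(p), len(k)
--     i = j = 0
--     while True:
--         # invariant: i and j are both at the start of a part
--         if i < n and p[i] == "*" and (i + 1 == n or p[i + 1] == "."):
--             # wildcard part: skip the key part
--             i += 1
--             while j < m and k[j] != ".":
--                 j += 1
--         else:
--             # literal part: compare character by character
--             while i < n and p[i] != ".":
--                 if j >= m or k[j] != p[i]:
--                     return False
--                 i += 1
--                 j += 1
--             if j < m and k[j] != ".":
--                 return False
--         if i == n and j == m: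
--             return True
--         if i == n or j == m:
--             return False
--         i += 1  # both cursors sit on a '.', step over it
--         j += 1
-- ===== Notes on version B (the rewrite author's own statement) =====
-- stated objective: alternative
-- what changed: B replaces A's split-both-strings-into-part-lists-then-zip comparison by a single lockstep character scan with two cursors (wildcard parts skip to the next dot, literal parts compare char by char), building no intermediate lists.
import Mathlib
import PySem

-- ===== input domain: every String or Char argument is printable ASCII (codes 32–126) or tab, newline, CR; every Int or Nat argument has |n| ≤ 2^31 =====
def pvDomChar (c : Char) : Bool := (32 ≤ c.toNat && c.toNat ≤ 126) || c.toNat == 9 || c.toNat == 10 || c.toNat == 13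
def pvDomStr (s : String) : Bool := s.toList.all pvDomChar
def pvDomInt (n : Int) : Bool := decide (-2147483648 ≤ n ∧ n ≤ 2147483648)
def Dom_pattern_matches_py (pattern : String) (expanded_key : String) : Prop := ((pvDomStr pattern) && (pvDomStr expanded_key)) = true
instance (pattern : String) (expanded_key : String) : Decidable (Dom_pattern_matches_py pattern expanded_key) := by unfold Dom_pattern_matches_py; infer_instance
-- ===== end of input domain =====

-- B replaces split-into-parts-then-zip by a single lockstep character scan of both
-- strings (objective: alternative; no intermediate part lists are built).

-- ===== PORT A =====
-- A: split both strings on '.', compare part counts, then scan the zipped parts.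
def pattern_matches_py (pattern : String) (expanded_key : String) : Bool :=
  match PySem.Str.split? pattern ".", PySem.Str.split? expanded_key "." with
  | some pattern_parts, some key_parts =>
      if pattern_parts.length ≠ key_parts.length then false
      else
        -- the for-loop with early 'return False' over zip(pattern_parts, key_parts)
        (pattern_parts.zip key_parts).all
          (fun pk => pk.1 == "*" || pk.1 == pk.2)
  | _, _ => false  -- unreachable: the separator "." is non-empty, split? is some

-- ===== PORT B =====
-- cursors of Source B are represented by the remaining suffix of each string

-- skip_part: drop key characters up to (not including) the next '.' or the end
def pvSkipPart : List Char → List Char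
  | [] => []
  | c :: r => if c ≠ '.' then pvSkipPart r else c :: r

-- `k and k[0] != "."`
def pvHeadNonDot : List Char → Bool
  | [] => false
  | d :: _ => d ≠ '.'

-- match_lit: consume one literal part from both strings; none on mismatch
def pvMatchLit : List Char → List Char → Option (List Char × List Char)
  | c :: p, k =>
      if c ≠ '.' then
        match k with
        | d :: k' => if d ≠ c then none else pvMatchLit p k'
        | [] => none
      else if pvHeadNonDot k then none else some (c :: p, k)
  | [], k => if pvHeadNonDot k then none else some ([], k)

theorem pvMatchLit_fst_length : ∀ (p k x y : List Char),
    pvMatchLit p k = some (x, y) → x.length ≤ p.length := by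
  intro p
  induction p with
  | nil => intro k x y h; simp only [pvMatchLit] at h; split at h <;> simp_all
  | cons c p ih =>
      intro k x y h
      simp only [pvMatchLit] at h
      split at h
      · cases k with
        | nil => simp at h
        | cons d k' =>
            simp only at h
            split at h
            · simp at h
            · have := ih _ x y h
              simpa using Nat.le_succ_of_le this
      · split at h
        · simp at h
        · simp only [Option.some.injEq, Prod.mk.injEq] at h
          simp [← h.1]

-- one step of the main loop: consume one part from both strings (wildcard or literal)
def pvStep (p k : List Char) : Option (List Char × List Char) :=
  match p with
  | '*' :: rest =>
      if rest = [] ∨ rest.head? = some '.' then some (rest, pvSkipPart k)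
      else pvMatchLit p k
  | _ => pvMatchLit p k

theorem pvStep_fst_length (p k x y : List Char) (h : pvStep p k = some (x, y)) :
    x.length ≤ p.length := by
  unfold pvStep at h
  split at h
  · split at h
    · simp only [Option.some.injEq, Prod.mk.injEq] at h
      simp [← h.1]
    · exact pvMatchLit_fst_length _ _ _ _ h
  · exact pvMatchLit_fst_length _ _ _ _ h

-- the main while-loop of Source B: p and k are both at the start of a part
def pvGo (p k : List Char) : Bool :=
  match h : pvStep p k with
  | none => false
  | some ([], []) => true
  | some (_ :: p', _ :: k') => pvGo p' k'   -- both sit on a '.', step over it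
  | some _ => false
termination_by p.length
decreasing_by
  have := pvStep_fst_length p k _ _ h
  simp at this
  omega

def pattern_matches_py_alt (pattern : String) (expanded_key : String) : Bool :=
  pvGo pattern.toList expanded_key.toList

-- ===== PRECONDITION & SPEC =====
def Spec_pattern_matches_py (pattern : String) (expanded_key : String) (out : Bool) : Prop := out = pattern_matches_py_alt pattern expanded_key
instance (pattern : String) (expanded_key : String) (out : Bool) : Decidable (Spec_pattern_matches_py pattern expanded_key out) := by unfold Spec_pattern_matches_py; infer_instance

-- ===== CLAIM (what is proved, stated in full; the proofs are below) =====
def Claim_equal_pattern_matches_py : Prop := ∀ (pattern : String) (expanded_key : String), Dom_pattern_matches_py pattern expanded_key → Spec_pattern_matches_py pattern expanded_key (pattern_matches_py pattern expanded_key)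

-- ===== LEMMAS AND PROOFS =====

-- "is not the separator": kept as a named predicate so rewriting stays syntactic
def nd (c : Char) : Bool := c != '.'

theorem nd_true {c : Char} (h : c ≠ '.') : nd c = true := by simp [nd, h]
theorem nd_false : nd '.' = false := by simp [nd]

-- proof-side model of Python's split(".") on a list of characters
def splitOn1 : List Char → List (List Char)
  | [] => [[]]
  | c :: r => if c = '.' then [] :: splitOn1 r
              else match splitOn1 r with
                   | h :: t => (c :: h) :: t
                   | [] => [[c]]

def consHead (pre : List Char) : List (List Char) → List (List Char)
  | h :: t => (pre ++ h) :: t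
  | [] => [pre]

theorem splitOn1_ne_nil (l : List Char) : splitOn1 l ≠ [] := by
  cases l with
  | nil => simp [splitOn1]
  | cons c r =>
      simp only [splitOn1]
      split
      · simp
      · split <;> simp

theorem consHead_nil (l : List (List Char)) (h : l ≠ []) : consHead [] l = l := by
  cases l with
  | nil => exact absurd rfl h
  | cons a t => simp [consHead]

theorem consHead_consHead (a b : List Char) (l : List (List Char)) :
    consHead a (consHead b l) = consHead (a ++ b) l := by
  cases l <;> simp [consHead]

theorem splitOn1_cons (c : Char) (r : List Char) :
    splitOn1 (c :: r) = if c = '.' then [] :: splitOn1 r else consHead [c] (splitOn1 r) := by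
  simp only [splitOn1]
  split
  · rfl
  · cases h : splitOn1 r with
    | nil => exact absurd h (splitOn1_ne_nil r)
    | cons a t => simp [consHead]

theorem splitOn_go_dot : ∀ (fuel : Nat) (l cur : List Char) (acc : List (List Char)),
    l.length ≤ fuel →
    PySem.Chars.splitOn.go ['.'] fuel l cur acc = acc.reverse ++ consHead cur.reverse (splitOn1 l) := by
  intro fuel
  induction fuel with
  | zero =>
      intro l cur acc h
      have : l = [] := List.eq_nil_of_length_eq_zero (Nat.le_zero.mp h)
      subst this
      rw [PySem.Chars.splitOn.go]
      simp [splitOn1, consHead]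
  | succ f ih =>
      intro l cur acc h
      cases l with
      | nil =>
          rw [PySem.Chars.splitOn.go]
          simp [splitOn1, consHead]
          try omega
      | cons c rest =>
          rw [PySem.Chars.splitOn.go]
          by_cases hc : c = '.'
          · subst hc
            simp only [show (['.'].isPrefixOf ('.' :: rest)) = true from by simp [List.isPrefixOf], if_true]
            simp only [List.length_cons, List.length_nil, List.drop_succ_cons, List.drop_zero]
            rw [ih rest [] (cur.reverse :: acc) (by simp at h; omega)]
            simp [splitOn1_cons, consHead_nil _ (splitOn1_ne_nil rest), consHead]
            cases hs : splitOn1 rest with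
            | nil => exact absurd hs (splitOn1_ne_nil rest)
            | cons a t => rfl
          · have hpre : (['.'].isPrefixOf (c :: rest)) = false := by
              simp [List.isPrefixOf, Ne.symm hc]
            simp only [hpre, Bool.false_eq_true, if_false]
            rw [ih rest (c :: cur) acc (by simp at h; omega)]
            rw [splitOn1_cons, if_neg hc, consHead_consHead]
            simp

theorem splitOn_dot (l : List Char) : PySem.Chars.splitOn l ['.'] = splitOn1 l := by
  unfold PySem.Chars.splitOn
  rw [splitOn_go_dot _ _ _ _ (Nat.le_succ _)]
  simp [consHead_nil _ (splitOn1_ne_nil l)]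

-- decomposition of splitOn1 into head part and the remainder
def splitTail (l : List Char) : List (List Char) :=
  match l.dropWhile nd with
  | [] => []
  | _ :: r => splitOn1 r

theorem splitOn1_decomp (l : List Char) :
    splitOn1 l = l.takeWhile nd :: splitTail l := by
  induction l with
  | nil => simp [splitOn1, splitTail]
  | cons c r ih =>
      rw [splitOn1_cons]
      by_cases hc : c = '.'
      · subst hc
        simp [splitTail, List.takeWhile_cons, List.dropWhile_cons, nd_false]
      · rw [if_neg hc, ih]
        simp [consHead, splitTail, List.takeWhile_cons, List.dropWhile_cons, nd_true hc]

-- part-level matching (what A computes after splitting)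
def partEq (a b : List Char) : Bool := a == ['*'] || a == b

def partsMatch : List (List Char) → List (List Char) → Bool
  | [], [] => true
  | a :: as, b :: bs => partEq a b && partsMatch as bs
  | _, _ => false

theorem partsMatch_eq : ∀ (as bs : List (List Char)),
    partsMatch as bs =
      ((as.length == bs.length) && (as.zip bs).all (fun x => partEq x.1 x.2)) := by
  intro as
  induction as with
  | nil => intro bs; cases bs <;> simp [partsMatch]
  | cons a as ih =>
      intro bs
      cases bs with
      | nil => simp [partsMatch]
      | cons b bs =>
          simp only [partsMatch, List.zip_cons_cons, List.all_cons, List.length_cons, ih]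
          rcases Bool.eq_false_or_eq_true (partEq a b) with h | h <;> simp [h]

-- pvSkipPart is dropWhile nd
theorem pvSkipPart_eq (k : List Char) : pvSkipPart k = k.dropWhile nd := by
  induction k with
  | nil => simp [pvSkipPart]
  | cons d k ih =>
      simp only [pvSkipPart, List.dropWhile_cons]
      by_cases h : d = '.'
      · subst h; simp [nd_false]
      · simp [nd_true h, h, ih]

-- pvMatchLit compares the head parts and returns both remainders
theorem pvMatchLit_eq : ∀ (p k : List Char),
    pvMatchLit p k =
      if p.takeWhile nd = k.takeWhile nd then
        some (p.dropWhile nd, k.dropWhile nd)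
      else none := by
  intro p
  induction p with
  | nil =>
      intro k
      cases k with
      | nil => simp [pvMatchLit, pvHeadNonDot]
      | cons d k' =>
          simp only [pvMatchLit, pvHeadNonDot, List.takeWhile_cons, List.dropWhile_cons,
            List.takeWhile_nil, List.dropWhile_nil]
          by_cases h : d = '.'
          · subst h; simp [nd_false]
          · simp [nd_true h, h]
  | cons c p ih =>
      intro k
      by_cases hc : c = '.'
      · subst hc
        simp only [pvMatchLit]
        cases k with
        | nil => simp [pvHeadNonDot, List.takeWhile_cons, nd_false]
        | cons d k' =>
            simp only [pvHeadNonDot, List.takeWhile_cons, List.dropWhile_cons, nd_false]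
            by_cases h : d = '.'
            · subst h; simp [nd_false]
            · simp [nd_true h, h]
      · simp only [pvMatchLit, if_pos hc]
        cases k with
        | nil => simp [List.takeWhile_cons, List.takeWhile_nil, nd_true hc]
        | cons d k' =>
            simp only [List.takeWhile_cons, List.dropWhile_cons]
            by_cases hd : d = '.'
            · subst hd
              simp [nd_true hc, nd_false, Ne.symm hc]
            · by_cases hdc : d = c
              · subst hdc
                simp [nd_true hc, ih k']
              · simp [nd_true hc, nd_true hd, hdc, Ne.symm hdc]

-- p is not a lone-star part  →  its head part is not ["*"]
theorem head_part_ne_star (p : List Char)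
    (h : ∀ rest, p = '*' :: rest → ¬(rest = [] ∨ rest.head? = some '.')) :
    p.takeWhile nd ≠ ['*'] := by
  intro hcontra
  cases p with
  | nil => simp [List.takeWhile_nil] at hcontra
  | cons c r =>
      rw [List.takeWhile_cons] at hcontra
      by_cases hc : c = '.'
      · rw [hc, nd_false] at hcontra; simp at hcontra
      · rw [nd_true hc, if_pos rfl] at hcontra
        obtain ⟨hc2, hr⟩ := List.cons_eq_cons.mp hcontra
        subst hc2
        apply h r rfl
        cases r with
        | nil => left; rfl
        | cons d r' =>
            right
            rw [List.takeWhile_cons] at hr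
            by_cases hd : d = '.'
            · simp [hd]
            · rw [nd_true hd, if_pos rfl] at hr; simp at hr

-- pvStep in closed form: both branches consume exactly the head part of each side
theorem pvStep_eq (p k : List Char) :
    pvStep p k =
      if p.takeWhile nd = ['*'] ∨ p.takeWhile nd = k.takeWhile nd then
        some (p.dropWhile nd, k.dropWhile nd)
      else none := by
  unfold pvStep
  split
  · rename_i rest
    by_cases hcond : rest = [] ∨ rest.head? = some '.'
    · rw [if_pos hcond]
      have htw : ('*' :: rest).takeWhile nd = ['*'] := by
        rw [List.takeWhile_cons, nd_true (by decide), if_pos rfl]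
        rcases hcond with h | h
        · simp [h]
        · cases rest with
          | nil => simp
          | cons d r =>
              simp only [List.head?] at h
              simp [List.takeWhile_cons, show d = '.' from by simpa using h, nd_false]
      have hdw : ('*' :: rest).dropWhile nd = rest := by
        rw [List.dropWhile_cons, nd_true (by decide), if_pos rfl]
        rcases hcond with h | h
        · simp [h]
        · cases rest with
          | nil => simp
          | cons d r =>
              simp only [List.head?] at h
              simp [List.dropWhile_cons, show d = '.' from by simpa using h, nd_false]
      rw [htw, hdw, if_pos (Or.inl rfl), pvSkipPart_eq]
    · rw [if_neg hcond, pvMatchLit_eq]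
      have hne : ('*' :: rest).takeWhile nd ≠ ['*'] := by
        apply head_part_ne_star
        intro rest' heq
        obtain rfl : rest = rest' := by simpa using heq
        exact hcond
      by_cases h2 : ('*' :: rest).takeWhile nd = k.takeWhile nd
      · rw [if_pos h2, if_pos (Or.inr h2)]
      · rw [if_neg h2, if_neg (by rintro (h | h) <;> [exact hne h; exact h2 h])]
  · rename_i hnp
    rw [pvMatchLit_eq]
    have hne : p.takeWhile nd ≠ ['*'] := by
      apply head_part_ne_star
      intro rest heq
      exact (hnp rest heq).elim
    by_cases h2 : p.takeWhile nd = k.takeWhile nd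
    · rw [if_pos h2, if_pos (Or.inr h2)]
    · rw [if_neg h2, if_neg (by rintro (h | h) <;> [exact hne h; exact h2 h])]

theorem partEq_true {a b : List Char} (h : a = ['*'] ∨ a = b) : partEq a b = true := by
  rcases h with h | h <;> simp [partEq, h]

theorem partEq_false {a b : List Char} (h : ¬(a = ['*'] ∨ a = b)) : partEq a b = false := by
  push_neg at h
  simp [partEq, h.1, h.2]

theorem partsMatch_nil_right (as : List (List Char)) (h : as ≠ []) : partsMatch [] as = false := by
  cases as with
  | nil => exact absurd rfl h
  | cons a t => rfl

theorem partsMatch_nil_left (as : List (List Char)) (h : as ≠ []) : partsMatch as [] = false := by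
  cases as with
  | nil => exact absurd rfl h
  | cons a t => rfl

-- the main loop computes part-level matching of the two splits
theorem pvGo_eq_aux : ∀ (n : Nat) (p k : List Char), p.length ≤ n →
    pvGo p k = partsMatch (splitOn1 p) (splitOn1 k) := by
  intro n
  induction n with
  | zero =>
      intro p k hlen
      have hp : p = [] := by cases p <;> simp_all
      subst hp
      rw [pvGo, pvStep_eq]
      rw [splitOn1_decomp [], splitOn1_decomp k]
      simp only [List.takeWhile_nil, List.dropWhile_nil, splitTail, List.dropWhile_nil]
      by_cases hcond : ([] : List Char) = ['*'] ∨ ([] : List Char) = k.takeWhile nd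
      · rw [if_pos hcond]
        cases hd : k.dropWhile nd with
        | nil => simp [partsMatch, partEq_true hcond, hd]
        | cons d k' =>
            simp only [hd, partsMatch, partEq_true hcond, Bool.true_and]
            exact (partsMatch_nil_right _ (splitOn1_ne_nil k')).symm
      · rw [if_neg hcond]
        simp [partsMatch, partEq_false hcond]
  | succ n ih =>
      intro p k hlen
      rw [pvGo, pvStep_eq]
      rw [splitOn1_decomp p, splitOn1_decomp k]
      by_cases hcond : p.takeWhile nd = ['*'] ∨ p.takeWhile nd = k.takeWhile nd
      · rw [if_pos hcond]
        cases hdp : p.dropWhile nd with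
        | nil =>
            cases hdk : k.dropWhile nd with
            | nil => simp [partsMatch, partEq_true hcond, splitTail, hdp, hdk]
            | cons d k' =>
                simp only [partsMatch, partEq_true hcond, Bool.true_and, splitTail, hdp, hdk]
                exact (partsMatch_nil_right _ (splitOn1_ne_nil k')).symm
        | cons c p' =>
            cases hdk : k.dropWhile nd with
            | nil =>
                simp only [partsMatch, partEq_true hcond, Bool.true_and, splitTail, hdp, hdk]
                exact (partsMatch_nil_left _ (splitOn1_ne_nil p')).symm
            | cons d k' =>
                have hlen' : p'.length ≤ n := by
                  have h1 := List.length_dropWhile_le (p := nd) (l := p)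
                  rw [hdp] at h1
                  simp at h1
                  omega
                simp only [partsMatch, partEq_true hcond, Bool.true_and, splitTail, hdp, hdk]
                exact ih p' k' hlen'
      · rw [if_neg hcond]
        simp [partsMatch, partEq_false hcond]

theorem pvGo_eq (p k : List Char) : pvGo p k = partsMatch (splitOn1 p) (splitOn1 k) :=
  pvGo_eq_aux p.length p k (Nat.le_refl _)

theorem ofList_beq (a b : List Char) : (String.ofList a == String.ofList b) = (a == b) := by
  by_cases h : a = b <;> simp [h, String.ofList_inj]

theorem split?_dot (s : String) :
    PySem.Str.split? s "." = some ((splitOn1 s.toList).map String.ofList) := by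
  unfold PySem.Str.split?
  rw [show (".").toList = ['.'] from rfl]
  unfold PySem.Chars.split?
  simp [splitOn_dot]

theorem all_part (l : List (List Char × List Char)) :
    (l.map (Prod.map String.ofList String.ofList)).all
        (fun pk => pk.1 == "*" || pk.1 == pk.2) =
      l.all (fun x => partEq x.1 x.2) := by
  induction l with
  | nil => rfl
  | cons a t ih =>
      simp only [List.map_cons, List.all_cons, ih]
      congr 1
      cases a with
      | mk x y =>
          simp only [Prod.map, partEq]
          rw [show ("*" : String) = String.ofList ['*'] from by decide]
          rw [ofList_beq, ofList_beq]

-- ===== VERDICT (by name: the statement is the Claim_ definition above) =====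
theorem pattern_matches_py_spec : Claim_equal_pattern_matches_py := by
  intro pattern expanded_key _
  unfold Spec_pattern_matches_py pattern_matches_py pattern_matches_py_alt
  rw [split?_dot, split?_dot, pvGo_eq, partsMatch_eq]
  simp only [List.length_map]
  by_cases hl : (splitOn1 pattern.toList).length = (splitOn1 expanded_key.toList).length
  · rw [if_neg (by simp [hl])]
    rw [List.zip_map, all_part]
    simp [hl]
  · rw [if_pos (by simp [hl])]
    simp [hl]
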